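-- pv_equiv track=rewrite | github.com/simoncellibastien/Password_Generator | message.py | madeRijndaelMixColumns
-- ===== SOURCE A (Python) =====
-- import variables, utils, copy
--
-- def madeRijndaelMixColumns(length):
--     sub_list = []
--     values = ['02', '01', '01', '03']
--     rijndael = ['02', '01', '01', '03']
--     length_rijndael = len(rijndael)
--     # Add rijndael pattern as long as the key length is not reached
--     while length_rijndael < length:
--         for x in values:
--             rijndael.append(x)
--         length_rijndael = len(rijndael)
--     # Cut to suits the key length
--     rijndael = rijndael[0:length]
--     # Make a shift for each lines to suits Rijndael's Galois field
--     for i in range(length):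
--         sub_list.append(offsetRijndael(copy.deepcopy(rijndael), i))
--     return sub_list
--
-- def offsetRijndael(sub_list, j):
--     for i in range(0,j):
--         hexa = sub_list.pop(-1)
--         sub_list.insert(0, hexa)
--     return sub_list
-- ===== SOURCE B (Python) =====
-- def madeRijndaelMixColumns(length):
--     # closed-form: cell (i, p) of the i-th right-rotation of the repeating
--     # pattern ['02','01','01','03'] is values[((p - i) % length) % 4]
--     values = ['02', '01', '01', '03']
--     return [[values[((p - i) % length) % 4] for p in range(length)]
--             for i in range(length)]
-- ===== Notes on version B (the rewrite author's own statement) =====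
-- stated objective: simpler
-- what changed: Replaces building the repeated pattern and right-rotating a deepcopy once per row (pop/insert loops) with a nested comprehension that computes each cell directly by the closed-form modular index values[((p - i) % length) % 4].
import Mathlib
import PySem

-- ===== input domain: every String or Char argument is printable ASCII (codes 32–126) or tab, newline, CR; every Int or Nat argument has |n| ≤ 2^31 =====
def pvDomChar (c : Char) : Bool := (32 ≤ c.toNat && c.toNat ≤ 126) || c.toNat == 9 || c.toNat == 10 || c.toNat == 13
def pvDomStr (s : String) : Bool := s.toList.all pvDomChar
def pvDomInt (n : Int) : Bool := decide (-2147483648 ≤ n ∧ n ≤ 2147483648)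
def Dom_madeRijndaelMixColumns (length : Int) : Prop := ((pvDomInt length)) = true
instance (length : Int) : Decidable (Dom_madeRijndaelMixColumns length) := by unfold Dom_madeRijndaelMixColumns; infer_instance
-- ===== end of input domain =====

-- B replaces pattern-building plus per-row pop/insert rotation by a closed-form
-- modular index per cell (objective: simpler: a closed-form nested comprehension).

-- ===== PORT A =====
def pvValuesA : List String := ["02", "01", "01", "03"]

-- 'while length_rijndael < length: for x in values: rijndael.append(x)'
def pvExtend (length : Int) (rijndael : List String) : List String :=
  if (rijndael.length : Int) < length then pvExtend length (rijndael ++ pvValuesA)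
  else rijndael
termination_by (length - rijndael.length).toNat
decreasing_by simp [pvValuesA]; omega

-- one body of the loop in offsetRijndael: hexa = sub.pop(-1); sub.insert(0, hexa)
def pvStep (sub : List String) : List String :=
  match PySem.List.pop? sub with
  | some (hexa, rest) => PySem.List.insert rest 0 hexa
  | none => sub   -- Python raises IndexError on []; never reached by the caller

def pvOffsetRijndael (sub_list : List String) (j : Int) : List String :=
  (PySem.List.pyRange 0 j 1).foldl (fun sub _ => pvStep sub) sub_list

def madeRijndaelMixColumns (length : Int) : List (List String) :=
  let rijndael := pvExtend length pvValuesA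
  let rijndael := PySem.List.slice rijndael (some 0) (some length)
  (PySem.List.pyRange 0 length 1).foldl
    (fun sub_list i => sub_list ++ [pvOffsetRijndael rijndael i]) []

-- ===== PORT B =====
def pvValuesB : List String := ["02", "01", "01", "03"]

def madeRijndaelMixColumns_alt (length : Int) : List (List String) :=
  (PySem.List.pyRange 0 length 1).map (fun i =>
    (PySem.List.pyRange 0 length 1).map (fun p =>
      PySem.List.pyGetD pvValuesB (PySem.Int.mod (PySem.Int.mod (p - i) length) 4) ""))

-- ===== PRECONDITION & SPEC =====
def Spec_madeRijndaelMixColumns (length : Int) (out : List (List String)) : Prop := out = madeRijndaelMixColumns_alt length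
instance (length : Int) (out : List (List String)) : Decidable (Spec_madeRijndaelMixColumns length out) := by unfold Spec_madeRijndaelMixColumns; infer_instance

-- ===== CLAIM (what is proved, stated in full; the proofs are below) =====
def Claim_equal_madeRijndaelMixColumns : Prop := ∀ (length : Int), Dom_madeRijndaelMixColumns length → Spec_madeRijndaelMixColumns length (madeRijndaelMixColumns length)

-- ===== LEMMAS AND PROOFS =====

-- the i-th entry of the (unbounded) repeating pattern
def pvValAt (k : Nat) : String := pvValuesB.getD (k % 4) ""

-- the repeating pattern of length n
def pvCanon (n : Nat) : List String := (List.range n).map pvValAt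

theorem pvCanon_length (n : Nat) : (pvCanon n).length = n := by
  simp [pvCanon]

theorem pvCanon_four : pvValuesA = pvCanon 4 := by decide

theorem pvCanon_append (m : Nat) (hm : 4 ∣ m) :
    pvCanon m ++ pvValuesA = pvCanon (m + 4) := by
  have h4 : List.range (m + 4) = List.range m ++ (List.range 4).map (m + ·) :=
    List.range_add
  simp only [pvCanon, h4, List.map_append, List.map_map, List.append_cancel_left_eq]
  have : List.range 4 = [0, 1, 2, 3] := by decide
  simp only [this, List.map_cons, List.map_nil, Function.comp]
  simp only [pvValAt]
  have h0 : (m + 0) % 4 = 0 := by omega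
  have h1 : (m + 1) % 4 = 1 := by omega
  have h2 : (m + 2) % 4 = 2 := by omega
  have h3 : (m + 3) % 4 = 3 := by omega
  rw [h0, h1, h2, h3]
  decide

theorem pvCanon_take (M n : Nat) (h : n ≤ M) : (pvCanon M).take n = pvCanon n := by
  simp only [pvCanon, ← List.map_take, List.take_range]
  rw [Nat.min_eq_left h]

theorem pvCanon_getElem (n j : Nat) (h : j < (pvCanon n).length) :
    (pvCanon n)[j] = pvValAt j := by
  simp [pvCanon]

theorem pvExtend_canon (length : Int) :
    ∀ (f m : Nat), (length - m).toNat ≤ f → 4 ∣ m →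
    ∃ M : Nat, pvExtend length (pvCanon m) = pvCanon M ∧ length ≤ (M : Int) ∧ m ≤ M := by
  intro f
  induction f with
  | zero =>
    intro m hf hm
    refine ⟨m, ?_, by omega, le_refl m⟩
    rw [pvExtend]
    simp only [pvCanon_length]
    rw [if_neg (by omega)]
  | succ f ih =>
    intro m hf hm
    rw [pvExtend]
    simp only [pvCanon_length]
    by_cases h : (m : Int) < length
    · rw [if_pos h, pvCanon_append m hm]
      obtain ⟨M, hM, hlen, hle⟩ := ih (m + 4) (by omega) (by omega)
      exact ⟨M, hM, hlen, by omega⟩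
    · rw [if_neg h]
      exact ⟨m, rfl, by omega, le_refl m⟩

theorem pvPattern_eq (length : Int) (hpos : 0 < length) :
    PySem.List.slice (pvExtend length pvValuesA) (some 0) (some length)
      = pvCanon length.toNat := by
  obtain ⟨M, hM, hlen, -⟩ :=
    pvExtend_canon length (length - 4).toNat 4 (by omega) (by omega)
  rw [pvCanon_four, hM]
  rw [PySem.List.slice_zero_start, PySem.List.slice_to _ (by omega)]
  rw [pvCanon_take _ _ (by omega)]

theorem pvStep_rotate (r : List String) (h : r ≠ []) :
    pvStep r = r.rotate (r.length - 1) := by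
  have hpop : PySem.List.pop? r = some (r.getLast h, r.dropLast) := by
    conv_lhs => rw [← List.dropLast_append_getLast h]
    exact PySem.List.pop?_last _ _
  simp only [pvStep, hpop, PySem.List.insert_zero]
  rw [List.rotate_eq_drop_append_take (by omega)]
  rw [List.drop_length_sub_one h, ← List.dropLast_eq_take]
  rfl

theorem pvStep_iterate (r : List String) (h : r ≠ []) :
    ∀ j : Nat, pvStep^[j] r = r.rotate (j * (r.length - 1)) := by
  intro j
  induction j with
  | zero => simp
  | succ j ihj =>
    rw [Function.iterate_succ_apply', ihj]
    have hne : r.rotate (j * (r.length - 1)) ≠ [] := by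
      simp [List.rotate_eq_nil_iff, h]
    rw [pvStep_rotate _ hne, List.length_rotate, List.rotate_rotate]
    congr 1
    ring

theorem pvFoldl_const_iterate {α β : Type} (g : α → α) (l : List β) (init : α) :
    l.foldl (fun s _ => g s) init = g^[l.length] init := by
  induction l generalizing init with
  | nil => rfl
  | cons x xs ih => simp [List.foldl_cons, ih, Function.iterate_succ_apply]

theorem pvRow_eq (length : Int) (hpos : 0 < length) (i : Int)
    (hi0 : 0 ≤ i) (_hi : i < length) :
    pvOffsetRijndael (pvCanon length.toNat) i
      = (PySem.List.pyRange 0 length 1).map (fun p =>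
          PySem.List.pyGetD pvValuesB (PySem.Int.mod (PySem.Int.mod (p - i) length) 4) "") := by
  set n := length.toNat with hn
  have hln : length = (n : Int) := by omega
  have hcne : pvCanon n ≠ [] := by
    intro hnil
    have := pvCanon_length n
    rw [hnil] at this
    simp at this
    omega
  rw [pvOffsetRijndael, pvFoldl_const_iterate, PySem.List.length_pyRange_one]
  rw [pvStep_iterate _ hcne, pvCanon_length]
  apply List.ext_getElem
  · rw [List.length_rotate, pvCanon_length, List.length_map,
      PySem.List.length_pyRange_one]
    omega
  · intro k hk1 hk2
    rw [List.getElem_map, PySem.List.getElem_pyRange_one]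
    have hk : k < n := by
      rw [List.length_rotate, pvCanon_length] at hk1; exact hk1
    rw [List.getElem_rotate, pvCanon_getElem]
    simp only [pvCanon_length]
    set it := (i - 0).toNat with hit
    have hitn : (it : Int) = i := by omega
    -- B-side entry
    have hz : (0 : Int) + (k : Int) - i = (k : Int) - i := by ring
    rw [hz, PySem.Int.mod_eq_emod_of_pos hpos]
    have hm2 : PySem.Int.mod (((k : Int) - i) % length) 4
        = (((k : Int) - i) % length) % 4 := PySem.Int.mod_eq_emod_of_pos (by omega)
    rw [hm2]
    -- the two indices agree
    have hidx : (((k + it * (n - 1)) % n : Nat) : Int) = ((k : Int) - i) % length := by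
      have h1 : ((k + it * (n - 1) : Nat) : Int) = ((k : Int) - i) + (n : Int) * i := by
        have hn1 : (1 : Nat) ≤ n := by omega
        push_cast [Nat.cast_sub hn1]
        rw [hitn]
        ring
      rw [Int.natCast_mod, h1, hln, Int.add_mul_emod_self_left]
    have hnn : 0 ≤ (((k : Int) - i) % length) % 4 := by
      have := Int.emod_nonneg (((k : Int) - i) % length) (by omega : (4:Int) ≠ 0)
      omega
    have hcast : (((k : Int) - i) % length) % 4
        = (((((k + it * (n - 1)) % n) % 4 : Nat)) : Int) := by
      rw [Int.natCast_mod, hidx]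
      norm_num
    rw [hcast, PySem.List.pyGetD_natCast]
    rfl

-- ===== VERDICT (by name: the statement is the Claim_ definition above) =====
theorem madeRijndaelMixColumns_spec : Claim_equal_madeRijndaelMixColumns := by
  intro length _
  unfold Spec_madeRijndaelMixColumns madeRijndaelMixColumns madeRijndaelMixColumns_alt
  by_cases hpos : 0 < length
  · rw [PySem.List.foldl_append_singleton_eq_map, List.nil_append, pvPattern_eq length hpos]
    apply List.map_congr_left
    intro i hi
    rw [PySem.List.mem_pyRange_one] at hi
    exact pvRow_eq length hpos i hi.1 hi.2
  · rw [PySem.List.pyRange_one_eq_nil (by omega)]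
    rfl
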